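-- pv_equiv track=rewrite | github.com/aadhistii/Tugas_Proclub | Tugas_Week2.py | urutin
-- ===== SOURCE A (Python) =====
-- def urutin(dict):
--
--     # buat temporary list kosong untuk menyimpan key
--     li, hasil = [], []
--
--     # sort menurut kemunculannya
--     se = list(dict.values())
--     se.sort()
--
--     # masukkan ke list sesuai urutan kemunculannya
--     for i in range(len(se)):
--         for k in dict:
--             if dict[k] == se[i] and k not in li:
--                 li.append(k)
--
--         # append hasil
--         hasil.append("{}: {}".format(li[i], dict[li[i]]))
--
--     # kembalikan hasil akhir pengurutan
--     return hasil
-- ===== SOURCE B (Python) =====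
-- def urutin(dict):
--     # Group keys by value in one pass, then emit each bucket in ascending value order.
--     groups = {}
--     for k, v in dict.items():
--         groups.setdefault(v, []).append(k)
--     hasil = []
--     for v in sorted(groups):
--         for k in groups[v]:
--             hasil.append("{}: {}".format(k, v))
--     return hasil
-- ===== Notes on version B (the rewrite author's own statement) =====
-- stated objective: faster
-- what changed: B replaces A's sort-then-rescan-the-whole-dict-for-every-sorted-value nested loop by one grouping pass that buckets keys by value, followed by a single emission pass over the sorted distinct values; Pre_ only requires the association list to have pairwise-distinct keys, i.e. to actually represent a Python dict.
import Mathlib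
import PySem

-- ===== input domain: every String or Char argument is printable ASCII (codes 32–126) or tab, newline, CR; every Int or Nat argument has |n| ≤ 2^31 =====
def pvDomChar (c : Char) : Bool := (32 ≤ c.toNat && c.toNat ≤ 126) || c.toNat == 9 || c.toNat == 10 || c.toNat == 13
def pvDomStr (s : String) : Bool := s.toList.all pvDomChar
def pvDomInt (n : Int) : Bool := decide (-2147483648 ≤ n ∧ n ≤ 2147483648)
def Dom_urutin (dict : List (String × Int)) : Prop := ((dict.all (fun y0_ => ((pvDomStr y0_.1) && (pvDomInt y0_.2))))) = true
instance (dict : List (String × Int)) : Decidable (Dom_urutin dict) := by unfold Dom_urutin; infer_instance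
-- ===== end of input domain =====

-- B groups keys by value in one dict-building pass and emits the buckets in ascending
-- value order, instead of A's sort-then-rescan-the-whole-dict-per-value nested loop.

-- ===== PORT A =====

-- dict[k] : first-match lookup in the association list (a Python dict has unique keys;
--           in A, k is always a key of dict, so KeyError is impossible and the default 0 is never read)
def pvLookup (d : List (String × Int)) (k : String) : Int :=
  match d with
  | [] => 0
  | (k', v) :: t => if k' = k then v else pvLookup t k

-- the body of A's 'for i in range(len(se))' loop; state = (li, hasil).
-- se.getD i 0 is exact (i < se.length always); li.getD i "" models li[i], which is
-- always in range on a dict-shaped input (distinct keys, see Pre_urutin).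
def pvStepA (dict : List (String × Int)) (se : List Int) (st : List String × List String) (i : Nat) :
    List String × List String :=
  let li := dict.foldl
    (fun l kv => if (pvLookup dict kv.1 == se.getD i 0) && !(l.contains kv.1) then l ++ [kv.1] else l)
    st.1
  (li, st.2 ++ [li.getD i "" ++ ": " ++ PySem.Int.toStr (pvLookup dict (li.getD i ""))])

def urutin (dict : List (String × Int)) : List String :=
  let se := PySem.List.sorted (dict.map Prod.snd) (fun v => v)
  ((List.range se.length).foldl (pvStepA dict se) ([], [])).2

-- ===== PORT B =====

def urutin_alt (dict : List (String × Int)) : List String :=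
  let groups : PySem.Dict Int (List String) :=
    dict.foldl (fun g kv => g.modify kv.2 [] (fun l => l ++ [kv.1])) PySem.Dict.empty
  (PySem.List.sorted groups.keys (fun v => v)).foldl
    (fun hasil v => (groups.getD v []).foldl (fun h k => h ++ [k ++ ": " ++ PySem.Int.toStr v]) hasil)
    []

-- ===== PRECONDITION & SPEC =====
-- The argument is a Python dict: its keys are pairwise distinct. An association list with a
-- repeated key represents no dict input, so Pre_ requires distinct keys (it excludes nothing
-- a Python caller could pass).
def Pre_urutin (dict : List (String × Int)) : Prop := (dict.map Prod.fst).Nodup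
instance (dict : List (String × Int)) : Decidable (Pre_urutin dict) := by unfold Pre_urutin; infer_instance

def pvWitness_urutin : (List (String × Int)) := [("a", 2), ("b", 1), ("c", 2)]

def Spec_urutin (dict : List (String × Int)) (out : List String) : Prop := out = urutin_alt dict
instance (dict : List (String × Int)) (out : List String) : Decidable (Spec_urutin dict out) := by unfold Spec_urutin; infer_instance

-- ===== CLAIM (what is proved, stated in full; the proofs are below) =====
def Claim_equal_urutin : Prop := ∀ (dict : List (String × Int)), Dom_urutin dict → Pre_urutin dict → Spec_urutin dict (urutin dict)

-- ===== LEMMAS AND PROOFS =====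

-- the keys of dict whose value is v, in dict order
def pvBucket (dict : List (String × Int)) (v : Int) : List String :=
  (dict.filter (fun kv => kv.2 == v)).map Prod.fst

-- the keys of dict whose value occurs in l, grouped by first occurrence of the value in l
def pvPref (dict : List (String × Int)) (l : List Int) : List String :=
  (PySem.Set.ofList l).flatMap (pvBucket dict)

def pvFmt (k : String) (v : Int) : String := k ++ ": " ++ PySem.Int.toStr v

theorem pvLookup_eq {dict : List (String × Int)} {k : String} {v : Int}
    (hnd : (dict.map Prod.fst).Nodup) (hmem : (k, v) ∈ dict) : pvLookup dict k = v := by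
  induction dict with
  | nil => simp at hmem
  | cons kv t ih =>
    obtain ⟨k', v'⟩ := kv
    simp only [List.map_cons, List.nodup_cons] at hnd
    rcases List.mem_cons.1 hmem with h | h
    · cases h; simp [pvLookup]
    · have hne : k' ≠ k := by
        intro he; exact hnd.1 (he ▸ (List.mem_map.2 ⟨(k, v), h, rfl⟩))
      simp [pvLookup, hne, ih hnd.2 h]

theorem mem_pvBucket {dict : List (String × Int)} {k : String} {v : Int} :
    k ∈ pvBucket dict v ↔ (k, v) ∈ dict := by
  simp only [pvBucket, List.mem_map, List.mem_filter]
  constructor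
  · rintro ⟨⟨k', v'⟩, ⟨hm, hv⟩, rfl⟩
    simp only [beq_iff_eq] at hv; exact hv ▸ hm
  · intro h; exact ⟨(k, v), ⟨h, by simp⟩, rfl⟩

theorem pvLookup_of_mem_bucket {dict : List (String × Int)} {k : String} {v : Int}
    (hnd : (dict.map Prod.fst).Nodup) (hk : k ∈ pvBucket dict v) : pvLookup dict k = v :=
  pvLookup_eq hnd (mem_pvBucket.1 hk)

theorem pvCountP_cons_head (t : List (String × Int)) (v : Int) (D : List Int) (hv : v ∉ D) :
    t.countP (fun kv => decide (kv.2 ∈ v :: D))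
      = t.countP (fun kv => kv.2 == v) + t.countP (fun kv => decide (kv.2 ∈ D)) := by
  induction t with
  | nil => simp
  | cons kv t ih =>
    rw [List.countP_cons, List.countP_cons, List.countP_cons, ih]
    by_cases h : kv.2 = v
    · simp [h, hv]; omega
    · by_cases h2 : kv.2 ∈ D <;> simp [h, h2]
      omega

theorem length_flatMap_bucket (dict : List (String × Int)) (D : List Int) (hD : D.Nodup) :
    (D.flatMap (pvBucket dict)).length = dict.countP (fun kv => decide (kv.2 ∈ D)) := by
  induction D with
  | nil => simp
  | cons v D ih =>
    simp only [List.nodup_cons] at hD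
    rw [List.flatMap_cons, List.length_append, ih hD.2, pvCountP_cons_head dict v D hD.1,
      pvBucket, List.length_map, ← List.countP_eq_length_filter]

-- the inner 'for k in dict' loop: with distinct keys it appends exactly the new matching keys
theorem pvInner_fold (p : String × Int → Bool) (d : List (String × Int)) (li : List String)
    (hnd : (d.map Prod.fst).Nodup) :
    d.foldl (fun l kv => if p kv && !(l.contains kv.1) then l ++ [kv.1] else l) li
      = li ++ (d.filter (fun kv => p kv && !(li.contains kv.1))).map Prod.fst := by
  induction d generalizing li with
  | nil => simp
  | cons kv t ih =>
    simp only [List.map_cons, List.nodup_cons] at hnd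
    have hfresh : ∀ z ∈ t, z.1 ≠ kv.1 := by
      intro z hz he; exact hnd.1 (he ▸ (List.mem_map.2 ⟨z, hz, rfl⟩))
    rw [List.foldl_cons, List.filter_cons]
    by_cases hc : (p kv && !(li.contains kv.1)) = true
    · rw [if_pos hc, if_pos hc, ih _ hnd.2]
      have hfil : t.filter (fun z => p z && !((li ++ [kv.1]).contains z.1))
          = t.filter (fun z => p z && !(li.contains z.1)) := by
        apply List.filter_congr
        intro z hz
        have hz1 : (li ++ [kv.1]).contains z.1 = li.contains z.1 := by
          simp [hfresh z hz]
        rw [hz1]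
      rw [hfil]; simp
    · rw [if_neg hc, if_neg hc, ih _ hnd.2]

theorem pvSet_ofList_append {α : Type} [BEq α] (a b : List α) :
    PySem.Set.ofList (a ++ b) = b.foldl PySem.Set.add (PySem.Set.ofList a) := by
  rw [PySem.Set.ofList_eq_foldl, PySem.Set.ofList_eq_foldl, List.foldl_append]

theorem pvSet_ofList_sublist {α : Type} [BEq α] (l : List α) : (PySem.Set.ofList l).Sublist l := by
  induction l using List.reverseRecOn with
  | nil => simp [PySem.Set.ofList_eq_foldl]
  | append_singleton t x ih =>
    rw [pvSet_ofList_append]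
    simp only [List.foldl_cons, List.foldl_nil, PySem.Set.add]
    split
    · exact ih.trans (List.sublist_append_left t [x])
    · exact List.Sublist.append ih (List.Sublist.refl [x])

theorem pvSet_foldl_add_prefix {α : Type} [BEq α] (b : List α) (s : PySem.Set α) :
    s <+: b.foldl PySem.Set.add s := by
  induction b generalizing s with
  | nil => simp
  | cons x b ih =>
    refine List.IsPrefix.trans ?_ (ih (PySem.Set.add s x))
    simp only [PySem.Set.add]
    split
    · exact List.prefix_refl s
    · exact ⟨[x], rfl⟩

theorem pvSet_ofList_take_prefix {α : Type} [BEq α] (l : List α) (j : Nat) :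
    PySem.Set.ofList (l.take j) <+: PySem.Set.ofList l := by
  conv_rhs => rw [← List.take_append_drop j l]
  rw [pvSet_ofList_append]
  exact pvSet_foldl_add_prefix _ _

theorem pvPref_prefix (dict : List (String × Int)) (l : List Int) (j : Nat) :
    pvPref dict (l.take j) <+: pvPref dict l := by
  obtain ⟨t, ht⟩ := pvSet_ofList_take_prefix l j
  refine ⟨t.flatMap (pvBucket dict), ?_⟩
  rw [pvPref, pvPref, ← ht, List.flatMap_append]

-- A's outer loop invariant
theorem pvA_loop (dict : List (String × Int)) (hnd : (dict.map Prod.fst).Nodup)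
    (j : Nat) (hj : j ≤ (PySem.List.sorted (dict.map Prod.snd) (fun v => v)).length) :
    (List.range j).foldl (pvStepA dict (PySem.List.sorted (dict.map Prod.snd) (fun v => v))) ([], [])
      = (pvPref dict ((PySem.List.sorted (dict.map Prod.snd) (fun v => v)).take j),
         ((pvPref dict (PySem.List.sorted (dict.map Prod.snd) (fun v => v))).take j).map
           (fun k => pvFmt k (pvLookup dict k))) := by
  set se := PySem.List.sorted (dict.map Prod.snd) (fun v => v) with hse
  induction j with
  | zero => simp [pvPref, PySem.Set.ofList_eq_foldl]
  | succ j ih =>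
    have hj' : j ≤ se.length := Nat.le_of_succ_le hj
    have hjlt : j < se.length := hj
    rw [List.range_succ, List.foldl_append, ih hj', List.foldl_cons, List.foldl_nil]
    have hgetse : se.getD j 0 = se[j] := List.getD_eq_getElem se 0 hjlt
    have htake : se.take (j + 1) = se.take j ++ [se[j]] := by
      rw [List.take_add_one]
      simp [List.getElem?_eq_getElem hjlt]
    -- the inner 'for k in dict' loop
    have hinner := pvInner_fold (fun kv => pvLookup dict kv.1 == se.getD j 0) dict
      (pvPref dict (se.take j)) hnd
    have hcond : dict.filter
        (fun kv => (pvLookup dict kv.1 == se.getD j 0) && !((pvPref dict (se.take j)).contains kv.1))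
        = dict.filter
        (fun kv => (kv.2 == se[j]) && !((pvPref dict (se.take j)).contains kv.1)) := by
      apply List.filter_congr
      intro kv hkv
      rw [hgetse, pvLookup_eq hnd (show (kv.1, kv.2) ∈ dict from hkv)]
    -- key membership in the prefix
    have hmem_pref : ∀ k : String, k ∈ pvPref dict (se.take j) ↔
        ∃ v ∈ PySem.Set.ofList (se.take j), k ∈ pvBucket dict v := by
      intro k; exact List.mem_flatMap
    have hli : dict.foldl
        (fun l kv => if (pvLookup dict kv.1 == se.getD j 0) && !(l.contains kv.1) then l ++ [kv.1] else l)
        (pvPref dict (se.take j)) = pvPref dict (se.take (j + 1)) := by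
      rw [hinner, hcond]
      by_cases hv : se[j] ∈ se.take j
      · -- value already seen: nothing new is appended
        have hnil : dict.filter
            (fun kv => (kv.2 == se[j]) && !((pvPref dict (se.take j)).contains kv.1)) = [] := by
          rw [List.filter_eq_nil_iff]
          intro kv hkv
          simp only [Bool.and_eq_true, beq_iff_eq, Bool.not_eq_eq_eq_not, Bool.not_true,
            not_and]
          intro h2
          simp only [List.contains_eq_mem,
            decide_eq_false_iff_not, Decidable.not_not]
          exact (hmem_pref kv.1).2 ⟨se[j], (PySem.Set.mem_ofList _ _).2 hv,
            mem_pvBucket.2 (by rw [← h2]; exact hkv)⟩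
        have hset : PySem.Set.ofList (se.take (j + 1)) = PySem.Set.ofList (se.take j) := by
          rw [htake, pvSet_ofList_append, List.foldl_cons, List.foldl_nil]
          simp [PySem.Set.add, PySem.Set.contains, hv, PySem.Set.mem_ofList]
        rw [hnil]; simp [pvPref, hset]
      · -- a fresh value: exactly its bucket is appended
        have hfil : dict.filter
            (fun kv => (kv.2 == se[j]) && !((pvPref dict (se.take j)).contains kv.1))
            = dict.filter (fun kv => kv.2 == se[j]) := by
          apply List.filter_congr
          intro kv hkv
          by_cases h2 : kv.2 = se[j]
          · have hnot : kv.1 ∉ pvPref dict (se.take j) := by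
              intro hin
              obtain ⟨v', hv', hb⟩ := (hmem_pref kv.1).1 hin
              have : v' = kv.2 := by
                have h1 := pvLookup_of_mem_bucket hnd hb
                have h2' := pvLookup_eq hnd (show (kv.1, kv.2) ∈ dict from hkv)
                omega
              exact hv ((h2 ▸ this ▸ (PySem.Set.mem_ofList _ _).1 hv') :)
            simp [h2, hnot]
          · simp [h2]
        have hset : PySem.Set.ofList (se.take (j + 1))
            = PySem.Set.ofList (se.take j) ++ [se[j]] := by
          rw [htake, pvSet_ofList_append, List.foldl_cons, List.foldl_nil]
          simp [PySem.Set.add, PySem.Set.contains, hv, PySem.Set.mem_ofList]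
        rw [hfil]
        conv_rhs => rw [pvPref, hset, List.flatMap_append]
        simp [pvPref, pvBucket]
    -- length of the new li exceeds j
    have hlen : j < (pvPref dict (se.take (j + 1))).length := by
      rw [pvPref, length_flatMap_bucket dict _ (PySem.Set.nodup_ofList _)]
      have h1a : dict.countP (fun kv => decide (kv.2 ∈ PySem.Set.ofList (se.take (j + 1))))
          = (dict.map Prod.snd).countP (fun v => decide (v ∈ PySem.Set.ofList (se.take (j + 1)))) := by
        rw [List.countP_map]; rfl
      have h1 : dict.countP (fun kv => decide (kv.2 ∈ PySem.Set.ofList (se.take (j + 1))))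
          = se.countP (fun v => decide (v ∈ PySem.Set.ofList (se.take (j + 1)))) := by
        rw [h1a]
        exact (List.Perm.countP_eq _
          (PySem.List.sorted_perm (dict.map Prod.snd) (fun v => v) false)).symm
      have h2 : (se.take (j + 1)).countP
            (fun v => decide (v ∈ PySem.Set.ofList (se.take (j + 1))))
          ≤ se.countP (fun v => decide (v ∈ PySem.Set.ofList (se.take (j + 1)))) :=
        List.Sublist.countP_le (List.take_sublist _ _)
      have h3 : (se.take (j + 1)).countP
            (fun v => decide (v ∈ PySem.Set.ofList (se.take (j + 1))))
          = (se.take (j + 1)).length := by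
        rw [List.countP_eq_length]
        intro a ha
        simp [PySem.Set.mem_ofList, ha]
      have h4 : (se.take (j + 1)).length = j + 1 := by
        rw [List.length_take]; omega
      omega
    -- indexing: li is a prefix of the full key list
    have hpre : pvPref dict (se.take (j + 1)) <+: pvPref dict se := pvPref_prefix dict se (j + 1)
    obtain ⟨t, ht⟩ := hpre
    have hgd : (pvPref dict (se.take (j + 1))).getD j ""
        = (pvPref dict se).getD j "" := by
      rw [← ht, List.getD_append _ _ _ _ hlen]
    have hKlt : j < (pvPref dict se).length := by
      rw [← ht, List.length_append]; omega
    have htakeK : (pvPref dict se).take (j + 1)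
        = (pvPref dict se).take j ++ [(pvPref dict se).getD j ""] := by
      rw [List.take_add_one, List.getElem?_eq_getElem hKlt, List.getD_eq_getElem _ _ hKlt]
      rfl
    simp only [pvStepA, hli, hgd]
    rw [htakeK, List.map_append, List.map_singleton, pvFmt]


theorem pvKA_length (dict : List (String × Int)) :
    (pvPref dict (PySem.List.sorted (dict.map Prod.snd) (fun v => v))).length = dict.length := by
  rw [pvPref, length_flatMap_bucket dict _ (PySem.Set.nodup_ofList _)]
  rw [List.countP_eq_length]
  intro kv hkv
  simp only [PySem.Set.mem_ofList, decide_eq_true_eq]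
  exact ((PySem.List.sorted_perm (dict.map Prod.snd) (fun v => v) false).mem_iff).2
    (List.mem_map.2 ⟨kv, hkv, rfl⟩)

theorem pvU_eq (dict : List (String × Int)) :
    PySem.List.sorted (PySem.Set.ofList (dict.map Prod.snd)) (fun v => v)
      = PySem.Set.ofList (PySem.List.sorted (dict.map Prod.snd) (fun v => v)) := by
  have hperm : (PySem.Set.ofList (PySem.List.sorted (dict.map Prod.snd) (fun v => v))).Perm
      (PySem.Set.ofList (dict.map Prod.snd)) := by
    rw [List.perm_ext_iff_of_nodup (PySem.Set.nodup_ofList _) (PySem.Set.nodup_ofList _)]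
    intro a
    rw [PySem.Set.mem_ofList, PySem.Set.mem_ofList,
      (PySem.List.sorted_perm (dict.map Prod.snd) (fun v => v) false).mem_iff]
  have hpw : (PySem.Set.ofList (PySem.List.sorted (dict.map Prod.snd) (fun v => v))).Pairwise
      (· < ·) := by
    have hle := List.Pairwise.sublist (pvSet_ofList_sublist _)
      (PySem.List.sorted_pairwise (dict.map Prod.snd) (fun v => v))
    have hne : (PySem.Set.ofList (PySem.List.sorted (dict.map Prod.snd) (fun v => v))).Pairwise
        (· ≠ ·) := PySem.Set.nodup_ofList _
    exact (hle.and hne).imp (fun h => lt_of_le_of_ne h.1 h.2)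
  exact PySem.List.sorted_eq_of_perm_of_pairwise_lt _ _ _ hperm hpw

theorem pvA_eq_canon (dict : List (String × Int)) (hnd : (dict.map Prod.fst).Nodup) :
    urutin dict
      = (PySem.Set.ofList (PySem.List.sorted (dict.map Prod.snd) (fun v => v))).flatMap
          (fun v => (pvBucket dict v).map (fun k => pvFmt k v)) := by
  show ((List.range (PySem.List.sorted (dict.map Prod.snd) (fun v => v)).length).foldl
      (pvStepA dict (PySem.List.sorted (dict.map Prod.snd) (fun v => v))) ([], [])).2 = _
  rw [pvA_loop dict hnd _ le_rfl]
  have hlen : (PySem.List.sorted (dict.map Prod.snd) (fun v => v)).length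
      = (pvPref dict (PySem.List.sorted (dict.map Prod.snd) (fun v => v))).length := by
    rw [pvKA_length dict, (PySem.List.sorted_perm (dict.map Prod.snd) (fun v => v) false).length_eq,
      List.length_map]
  rw [hlen, List.take_length]
  dsimp only
  rw [pvPref, List.map_flatMap]
  induction (PySem.Set.ofList (PySem.List.sorted (dict.map Prod.snd) (fun v => v))) with
  | nil => simp
  | cons v U ih =>
    rw [List.flatMap_cons, List.flatMap_cons, ih]
    congr 1
    exact List.map_congr_left (fun k hk => by rw [pvFmt, pvFmt, pvLookup_of_mem_bucket hnd hk])

theorem pvB_eq_canon (dict : List (String × Int)) :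
    urutin_alt dict
      = (PySem.List.sorted (PySem.Set.ofList (dict.map Prod.snd)) (fun v => v)).flatMap
          (fun v => (pvBucket dict v).map (fun k => pvFmt k v)) := by
  show (PySem.List.sorted
      (dict.foldl (fun g kv => g.modify kv.2 [] (fun l => l ++ [kv.1])) PySem.Dict.empty).keys
      (fun v => v)).foldl
      (fun hasil v =>
        ((dict.foldl (fun g kv => g.modify kv.2 [] (fun l => l ++ [kv.1]))
            PySem.Dict.empty).getD v []).foldl
          (fun h k => h ++ [k ++ ": " ++ PySem.Int.toStr v]) hasil) [] = _
  have hswap : dict.foldl (fun g kv => g.modify kv.2 [] (fun l => l ++ [kv.1])) PySem.Dict.empty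
      = (dict.map (fun kv => (kv.2, kv.1))).foldl
          (fun d p => d.modify p.1 [] (fun l => l ++ [p.2])) PySem.Dict.empty := by
    rw [List.foldl_map]
  have hkeys : (dict.foldl (fun g kv => g.modify kv.2 [] (fun l => l ++ [kv.1]))
      PySem.Dict.empty).keys = PySem.Set.ofList (dict.map Prod.snd) := by
    rw [PySem.Dict.keys_foldl_modify_key dict (fun kv => kv.2) []
      (fun _ kv => (fun l => l ++ [kv.1])) PySem.Dict.empty]
    rw [PySem.Dict.keys_empty, PySem.Set.ofList_eq_foldl]
    rfl
  have hgetD : ∀ v : Int,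
      (dict.foldl (fun g kv => g.modify kv.2 [] (fun l => l ++ [kv.1]))
        PySem.Dict.empty).getD v [] = pvBucket dict v := by
    intro v
    rw [hswap, PySem.Dict.getD_foldl_modify_append]
    rw [List.filter_map, List.map_map]
    simp only [PySem.Dict.getD_empty, List.nil_append, pvBucket]
    rfl
  rw [hkeys]
  have hfun : (fun (hasil : List String) (v : Int) =>
      ((dict.foldl (fun g kv => g.modify kv.2 [] (fun l => l ++ [kv.1]))
          PySem.Dict.empty).getD v []).foldl
        (fun h k => h ++ [k ++ ": " ++ PySem.Int.toStr v]) hasil)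
      = (fun (hasil : List String) (v : Int) =>
          hasil ++ (pvBucket dict v).map (fun k => pvFmt k v)) := by
    funext hasil v
    rw [hgetD v, PySem.List.foldl_append_singleton_eq_map (fun k => k ++ ": " ++ PySem.Int.toStr v)]
    rfl
  rw [hfun, PySem.List.foldl_append_eq_flatMap, List.nil_append]

-- ===== VERDICT (by name: the statement is the Claim_ definition above) =====
theorem urutin_spec : Claim_equal_urutin := by
  intro dict _ hpre
  unfold Spec_urutin
  rw [pvA_eq_canon dict hpre, pvB_eq_canon dict, pvU_eq dict]
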